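-- pv_equiv track=rewrite | github.com/Osorabrian/Python-Notes | hash_map_problems.py | character_position_mapping
-- ===== SOURCE A (Python) =====
-- def character_position_mapping(word):
--     my_dict = {}
--     for index, letter in enumerate(word):
--         if letter in my_dict:
--             my_dict[letter].append(index)
--         else:
--             my_dict[letter] = [index]
--     return my_dict
-- ===== SOURCE B (Python) =====
-- def character_position_mapping(word):
--     # group-of-scans decomposition: distinct characters in first-appearance
--     # order, then one separate scan of word per distinct character
--     seen = dict.fromkeys(word)
--     return {c: [i for i, l in enumerate(word) if l == c] for c in seen}
-- ===== Notes on version B (the rewrite author's own statement) =====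
-- stated objective: alternative
-- what changed: Replaced A's single accumulating pass that mutates per-key lists in a dict with a two-phase group-of-scans: first the distinct characters in first-appearance order via dict.fromkeys, then a dict comprehension doing one separate enumerate-scan of word per distinct character.
import Mathlib
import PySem

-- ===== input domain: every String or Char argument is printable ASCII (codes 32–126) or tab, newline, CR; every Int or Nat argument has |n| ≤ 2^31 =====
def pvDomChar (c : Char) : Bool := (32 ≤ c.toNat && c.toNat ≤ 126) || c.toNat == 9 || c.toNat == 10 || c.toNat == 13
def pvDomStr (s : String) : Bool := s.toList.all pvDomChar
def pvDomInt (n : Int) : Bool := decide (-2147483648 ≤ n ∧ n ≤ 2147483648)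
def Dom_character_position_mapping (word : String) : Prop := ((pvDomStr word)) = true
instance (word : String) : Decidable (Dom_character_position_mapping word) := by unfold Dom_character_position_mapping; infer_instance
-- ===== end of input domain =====

-- B replaces A's single accumulating dict pass with first-appearance distinct keys plus one scan per key (alternative decomposition, same results).

-- ===== PORT A =====
-- A: one pass over enumerate(word), appending to the key's list if present, else inserting a fresh singleton.
def character_position_mapping (word : String) : List (String × List Int) :=
  ((PySem.List.enumerate word.toList).foldl
    (fun (d : PySem.Dict String (List Int)) p =>
      if d.contains (String.ofList [p.2]) then
        d.modify (String.ofList [p.2]) [] (· ++ [p.1])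
      else
        d.insert (String.ofList [p.2]) [p.1])
    PySem.Dict.empty).items

-- ===== PORT B =====
-- B: seen = dict.fromkeys(word) (ordered distinct characters), then one enumerate-scan of word per distinct character.
def character_position_mapping_alt (word : String) : List (String × List Int) :=
  (PySem.Set.ofList (word.toList.map (fun c => String.ofList [c]))).map
    (fun c => (c, ((PySem.List.enumerate word.toList).filter
                    (fun p => String.ofList [p.2] == c)).map (·.1)))

-- ===== PRECONDITION & SPEC =====
def Spec_character_position_mapping (word : String) (out : List (String × List Int)) : Prop := out = character_position_mapping_alt word
instance (word : String) (out : List (String × List Int)) : Decidable (Spec_character_position_mapping word out) := by unfold Spec_character_position_mapping; infer_instance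

-- ===== CLAIM (what is proved, stated in full; the proofs are below) =====
def Claim_equal_character_position_mapping : Prop := ∀ (word : String), Dom_character_position_mapping word → Spec_character_position_mapping word (character_position_mapping word)

-- ===== LEMMAS AND PROOFS =====

-- A's if/else step is exactly Python's d.modify (append with default []).
theorem cpm_step_eq :
    (fun (d : PySem.Dict String (List Int)) (p : Int × Char) =>
      if d.contains (String.ofList [p.2]) then
        d.modify (String.ofList [p.2]) [] (· ++ [p.1])
      else
        d.insert (String.ofList [p.2]) [p.1])
    = (fun (d : PySem.Dict String (List Int)) (p : Int × Char) =>
        d.modify (String.ofList [p.2]) [] (· ++ [p.1])) := by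
  funext d p
  by_cases h : d.contains (String.ofList [p.2]) = true
  · simp [h]
  · simp only [h]
    unfold PySem.Dict.modify
    rw [PySem.Dict.getD_of_not_contains d [] (by simpa using h)]
    simp

-- ===== VERDICT (by name: the statement is the Claim_ definition above) =====
theorem character_position_mapping_spec : Claim_equal_character_position_mapping := by
  intro word _
  unfold Spec_character_position_mapping character_position_mapping character_position_mapping_alt
  rw [cpm_step_eq]
  have hnd : ((PySem.List.enumerate word.toList).foldl
      (fun (d : PySem.Dict String (List Int)) p =>
        d.modify (String.ofList [p.2]) [] (· ++ [p.1])) PySem.Dict.empty).keys.Nodup := by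
    exact PySem.Dict.nodup_keys_foldl_modify_key (PySem.List.enumerate word.toList)
      (fun p : Int × Char => String.ofList [p.2]) ([] : List Int)
      (fun _ p l => l ++ [p.1]) PySem.Dict.empty (by simp)
  rw [PySem.Dict.items_eq_map_keys _ hnd []]
  have hkeys : ((PySem.List.enumerate word.toList).foldl
      (fun (d : PySem.Dict String (List Int)) p =>
        d.modify (String.ofList [p.2]) [] (· ++ [p.1])) PySem.Dict.empty).keys
      = PySem.Set.ofList (word.toList.map (fun c => String.ofList [c])) := by
    rw [PySem.Dict.keys_foldl_modify_key (PySem.List.enumerate word.toList)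
      (fun p : Int × Char => String.ofList [p.2]) ([] : List Int)
      (fun _ p l => l ++ [p.1]) PySem.Dict.empty]
    rw [show ((PySem.List.enumerate word.toList).map fun p => String.ofList [p.2])
        = word.toList.map (fun c => String.ofList [c]) from by
      rw [show ((PySem.List.enumerate word.toList).map fun p => String.ofList [p.2])
          = ((PySem.List.enumerate word.toList).map (·.2)).map (fun c => String.ofList [c]) from by
        rw [List.map_map]; rfl]
      rw [PySem.List.map_snd_enumerate]]
    simp [PySem.Dict.keys_empty, PySem.Set.update_nil_left]
  rw [hkeys]
  refine List.map_congr_left (fun c _ => ?_)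
  have hfold : ((PySem.List.enumerate word.toList).foldl
      (fun (d : PySem.Dict String (List Int)) p =>
        d.modify (String.ofList [p.2]) [] (· ++ [p.1])) PySem.Dict.empty)
      = (((PySem.List.enumerate word.toList).map
            (fun p => (String.ofList [p.2], p.1))).foldl
          (fun (d : PySem.Dict String (List Int)) p =>
            d.modify p.1 [] (· ++ [p.2])) PySem.Dict.empty) := by
    rw [List.foldl_map]
  rw [hfold, PySem.Dict.getD_foldl_modify_append]
  simp [List.filter_map, List.map_map, Function.comp_def]
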